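-- pv_equiv track=rewrite | github.com/KilakOriginal/util | shift-generator.py | merge_shifts
-- ===== SOURCE A (Python) =====
-- def merge_shifts(shifts: list[tuple]) -> dict:
--     todo = set([name for (name,_,_,_) in shifts])
--
--     result = {}
--     for name in todo:
--         result[name] = []
--
--     for shift in shifts:
--         name  = shift[0]
--         start = shift[1]
--         end   = shift[2]
--         type  = shift[3]
--
--         if result[name] \
--         and start == result[name][-1][1] \
--         and type == result[name][-1][2]:
--             result[name][-1] = (result[name][-1][0], end, type)
--         else:
--             result[name].append((start, end, type))
--
--     return result
-- ===== SOURCE B (Python) =====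
-- def _runs(items):
--     out = []
--     i = 0
--     n = len(items)
--     while i < n:
--         start, end, type = items[i]
--         i += 1
--         while i < n and items[i][0] == end and items[i][2] == type:
--             end = items[i][1]
--             i += 1
--         out.append((start, end, type))
--     return out
--
--
-- def merge_shifts(shifts: list[tuple]) -> dict:
--     names = list(dict.fromkeys(name for name, _, _, _ in shifts))
--     return {name: _runs([(s, e, t) for n, s, e, t in shifts if n == name])
--             for name in names}
-- ===== Notes on version B (the rewrite author's own statement) =====
-- stated objective: alternative
-- what changed: B drops A's mutable dict entirely: it lists the distinct names in first-occurrence order, filters each name's shifts out of the input, and collapses each maximal chained run with a two-level index scan (the inner loop walks to the end of a run before one interval is emitted), instead of A's per-shift dict update that rewrites the last stored interval.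
import Mathlib
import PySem

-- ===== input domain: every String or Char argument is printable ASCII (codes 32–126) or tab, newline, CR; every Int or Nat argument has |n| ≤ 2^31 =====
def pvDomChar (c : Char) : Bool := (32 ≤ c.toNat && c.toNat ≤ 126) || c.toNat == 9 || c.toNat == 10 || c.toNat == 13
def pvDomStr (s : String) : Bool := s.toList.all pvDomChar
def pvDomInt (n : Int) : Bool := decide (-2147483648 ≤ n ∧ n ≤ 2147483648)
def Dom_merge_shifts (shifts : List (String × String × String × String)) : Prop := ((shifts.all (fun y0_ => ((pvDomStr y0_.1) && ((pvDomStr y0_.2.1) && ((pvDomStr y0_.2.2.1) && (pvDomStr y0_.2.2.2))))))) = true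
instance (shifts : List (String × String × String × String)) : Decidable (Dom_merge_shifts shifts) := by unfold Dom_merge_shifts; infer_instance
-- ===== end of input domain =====

-- B replaces A's mutable dict with per-name filtering plus a run-extraction scan; same results, no dict mutation.
-- Python A's key order comes from a hash-ordered set; dict results are compared as dicts (order ignored),
-- and both Lean ports use the deterministic first-occurrence order.

-- ===== PORT A =====
-- A mutates result[name] in place (append / [-1] = …); the port rebuilds the entry and re-inserts it,
-- which yields the same dict. result[name] is always present (seeded from todo), so getD is exact.
def merge_shifts (shifts : List (String × String × String × String)) : List (String × List (String × String × String)) :=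
  let todo : PySem.Set String := PySem.Set.ofList (shifts.map (fun s => s.1))
  let result : PySem.Dict String (List (String × String × String)) :=
    todo.foldl (fun d name => d.insert name []) PySem.Dict.empty
  let result := shifts.foldl (fun d shift =>
    let name := shift.1
    let start := shift.2.1
    let «end» := shift.2.2.1
    let type := shift.2.2.2
    let cur := d.getD name []
    -- 'if result[name] and start == result[name][-1][1] and type == result[name][-1][2]' with
    -- Python's short-circuit: the [-1] accesses happen only when the list is nonempty
    match cur.getLast? with
    | some last =>
      if start == last.2.1 && type == last.2.2 then
        d.insert name (cur.dropLast ++ [(last.1, «end», type)])   -- result[name][-1] = (…)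
      else
        d.insert name (cur ++ [(start, «end», type)])             -- result[name].append
    | none => d.insert name (cur ++ [(start, «end», type)])) result
  result.items

-- ===== PORT B =====
-- inner 'while' of Source B's _runs: starting from the current run end `e` and type `ty`, consume the
-- chained items and return the final end together with the unconsumed suffix (the index i becomes
-- structural recursion on the remaining list)
def pvChain (e ty : String) : List (String × String × String) → String × List (String × String × String)
  | [] => (e, [])
  | t :: rest => if t.1 == e && t.2.2 == ty then pvChain t.2.1 ty rest else (e, t :: rest)

theorem pvChain_length (e ty : String) (l : List (String × String × String)) :
    (pvChain e ty l).2.length ≤ l.length := by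
  induction l generalizing e with
  | nil => simp [pvChain]
  | cons t rest ih =>
    simp only [pvChain]
    split
    · exact le_trans (ih _) (by simp)
    · simp

-- outer loop of _runs: emit one interval per maximal chained run
def pvRuns : List (String × String × String) → List (String × String × String)
  | [] => []
  | t :: rest =>
    let c := pvChain t.2.1 t.2.2 rest
    (t.1, c.1, t.2.2) :: pvRuns c.2
  termination_by l => l.length
  decreasing_by exact Nat.lt_succ_of_le (pvChain_length _ _ rest)

-- list(dict.fromkeys(…)) = distinct names in first-occurrence order; the comprehension filters then projects
def merge_shifts_alt (shifts : List (String × String × String × String)) : List (String × List (String × String × String)) :=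
  let names : PySem.Set String := PySem.Set.ofList (shifts.map (fun s => s.1))
  names.map (fun name => (name, pvRuns ((shifts.filter (fun s => s.1 == name)).map (fun s => s.2))))

-- ===== PRECONDITION & SPEC =====
def Spec_merge_shifts (shifts : List (String × String × String × String)) (out : List (String × List (String × String × String))) : Prop := out = merge_shifts_alt shifts
instance (shifts : List (String × String × String × String)) (out : List (String × List (String × String × String))) : Decidable (Spec_merge_shifts shifts out) := by unfold Spec_merge_shifts; infer_instance

-- ===== CLAIM (what is proved, stated in full; the proofs are below) =====
def Claim_equal_merge_shifts : Prop := ∀ (shifts : List (String × String × String × String)), Dom_merge_shifts shifts → Spec_merge_shifts shifts (merge_shifts shifts)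

-- ===== LEMMAS AND PROOFS =====

-- A's single-interval merge step, extracted
def pvStepB (merged : List (String × String × String)) (t : String × String × String) : List (String × String × String) :=
  match merged.getLast? with
  | some last =>
    if last.2.1 == t.1 && last.2.2 == t.2.2 then
      merged.dropLast ++ [(last.1, t.2.1, t.2.2)]
    else merged ++ [t]
  | none => merged ++ [t]

theorem pvBeqComm (a b : String) : (a == b) = (b == a) := by
  by_cases h : a = b
  · simp [h]
  · simp [h, Ne.symm h]

-- A's loop body is: re-insert name ↦ pvStepB (current run) (this shift's triple)
theorem pvAstep_eq :
    (fun (d : PySem.Dict String (List (String × String × String)))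
         (shift : String × String × String × String) =>
      let name := shift.1
      let start := shift.2.1
      let «end» := shift.2.2.1
      let type := shift.2.2.2
      let cur := d.getD name []
      match cur.getLast? with
      | some last =>
        if start == last.2.1 && type == last.2.2 then
          d.insert name (cur.dropLast ++ [(last.1, «end», type)])
        else
          d.insert name (cur ++ [(start, «end», type)])
      | none => d.insert name (cur ++ [(start, «end», type)]))
    = fun d s => d.insert s.1 (pvStepB (d.getD s.1 []) s.2) := by
  funext d s
  obtain ⟨n, st, en, ty⟩ := s
  simp only [pvStepB]
  cases (d.getD n []).getLast? with
  | none => rfl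
  | some last =>
    simp only [pvBeqComm st last.2.1, pvBeqComm ty last.2.2]
    split <;> rfl

-- the run stored at key n after folding A's loop over l
theorem pvFoldA_getD (l : List (String × String × String × String))
    (d : PySem.Dict String (List (String × String × String))) (n : String) :
    (l.foldl (fun d s => d.insert s.1 (pvStepB (d.getD s.1 []) s.2)) d).getD n []
      = ((l.filter (fun s => s.1 == n)).map (fun s => s.2)).foldl pvStepB (d.getD n []) := by
  induction l generalizing d with
  | nil => rfl
  | cons s l ih =>
    simp only [List.foldl_cons, List.filter_cons]
    by_cases h : s.1 = n
    · simp only [h, beq_self_eq_true, if_pos, List.map_cons, List.foldl_cons, ih,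
        PySem.Dict.getD_insert]
    · have hb : (s.1 == n) = false := by simp [h]
      simp only [hb, if_neg, Bool.false_eq_true, not_false_eq_true, ih,
        PySem.Dict.getD_insert, if_neg (Ne.symm h)]

-- the seeding loop: every name of todo bound to []
theorem pvSeed_items (names : List String) :
    ((PySem.Set.ofList names).foldl (fun d name => d.insert name ([] : List (String × String × String))) PySem.Dict.empty).items
      = (PySem.Set.ofList names).map (fun n => (n, ([] : List (String × String × String)))) := by
  have h := PySem.Dict.items_foldl_insert_fresh (κ := String) (ν := List (String × String × String)) (PySem.Set.ofList names) (fun n => n)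
      (fun _ => ([] : List (String × String × String))) PySem.Dict.empty
      (by intro a _; simp [PySem.Dict.contains_empty])
      (by simp)
  simp at h; exact h

theorem pvSeed_keys (names : List String) :
    ((PySem.Set.ofList names).foldl (fun d name => d.insert name ([] : List (String × String × String))) PySem.Dict.empty).keys
      = PySem.Set.ofList names := by
  simp only [PySem.Dict.keys]
  rw [pvSeed_items]
  simp [Function.comp_def]

theorem pvSeed_getD (names : List String) (n : String) :
    ((PySem.Set.ofList names).foldl (fun d name => d.insert name ([] : List (String × String × String))) PySem.Dict.empty).getD n []
      = ([] : List (String × String × String)) := by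
  set d0 := (PySem.Set.ofList names).foldl
      (fun d name => d.insert name ([] : List (String × String × String))) PySem.Dict.empty with hd0
  by_cases h : n ∈ PySem.Set.ofList names
  · have hm : (n, ([] : List (String × String × String))) ∈ d0.items := by
      rw [hd0, pvSeed_items]; exact List.mem_map_of_mem h
    have hnd : d0.keys.Nodup := by rw [hd0, pvSeed_keys]; exact PySem.Set.nodup_ofList names
    exact PySem.Dict.getD_of_mem_items _ hm hnd []
  · refine PySem.Dict.getD_of_not_contains _ _ ?_
    rw [← Bool.not_eq_true]
    intro hc
    have hm := (PySem.Dict.contains_iff_mem_keys d0 n).mp hc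
    rw [hd0, pvSeed_keys] at hm
    exact h hm

theorem pvAdd_mem {s : PySem.Set String} {x : String} (h : x ∈ s) : s.add x = s := by
  unfold PySem.Set.add; simp [h]

theorem pvUpdate_self (l : List String) (s : PySem.Set String) (h : ∀ x ∈ l, x ∈ s) :
    PySem.Set.update s l = s := by
  induction l generalizing s with
  | nil => rfl
  | cons x l ih =>
    show PySem.Set.update (s.add x) l = s
    rw [pvAdd_mem (h x (by simp))]
    exact ih s (fun y hy => h y (by simp [hy]))

theorem pvUpdate_ofList_self (names : List String) :
    PySem.Set.update (PySem.Set.ofList names) names = PySem.Set.ofList names :=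
  pvUpdate_self names _ (fun x hx => (PySem.Set.mem_ofList names x).mpr hx)

-- A's fold, started on a list ending in the open interval (a,b,c), consumes exactly the chained
-- prefix of l into that interval and then continues fresh on the remainder
theorem pvFoldB_run (l : List (String × String × String)) (pre : List (String × String × String))
    (a b c : String) :
    l.foldl pvStepB (pre ++ [(a, b, c)]) =
      pre ++ (a, (pvChain b c l).1, c) :: (pvChain b c l).2.foldl pvStepB [] := by
  induction l generalizing pre a b c with
  | nil => simp [pvChain]
  | cons t ts ih =>
    simp only [List.foldl_cons, pvChain]
    by_cases h : (t.1 == b && t.2.2 == c) = true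
    · have h1 : t.1 = b := eq_of_beq (by exact (Bool.and_eq_true ..).mp h |>.1)
      have h2 : t.2.2 = c := eq_of_beq (by exact (Bool.and_eq_true ..).mp h |>.2)
      have hstep : pvStepB (pre ++ [(a, b, c)]) t = pre ++ [(a, t.2.1, c)] := by
        simp only [pvStepB, List.getLast?_concat, List.dropLast_concat]
        rw [pvBeqComm b t.1, pvBeqComm c t.2.2, h]
        simp [h2]
      rw [hstep, if_pos h, ih]
    · have hstep : pvStepB (pre ++ [(a, b, c)]) t = (pre ++ [(a, b, c)]) ++ [t] := by
        simp only [pvStepB, List.getLast?_concat]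
        rw [pvBeqComm b t.1, pvBeqComm c t.2.2, if_neg h]
      rw [hstep, if_neg h]
      obtain ⟨t1, t2, t3⟩ := t
      rw [ih]
      have hrhs : (ts.foldl pvStepB [(t1, t2, t3)]) =
          (t1, (pvChain t2 t3 ts).1, t3) :: (pvChain t2 t3 ts).2.foldl pvStepB [] := by
        have := ih (pre := []) (a := t1) (b := t2) (c := t3)
        simpa using this
      simp [List.foldl_cons, pvStepB, hrhs]

-- hence A's per-name fold computes exactly B's run extraction
theorem pvRuns_eq (l : List (String × String × String)) :
    l.foldl pvStepB [] = pvRuns l := by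
  induction l using pvRuns.induct with
  | case1 => simp [pvRuns]
  | case2 t rest c ih =>
    have h0 : pvStepB [] t = [] ++ [(t.1, t.2.1, t.2.2)] := rfl
    rw [List.foldl_cons, h0, pvFoldB_run, List.nil_append, pvRuns]
    exact congrArg _ ih

-- ===== VERDICT (by name: the statement is the Claim_ definition above) =====
theorem merge_shifts_spec : Claim_equal_merge_shifts := by
  intro shifts _
  show merge_shifts shifts = merge_shifts_alt shifts
  simp only [merge_shifts, merge_shifts_alt]
  rw [pvAstep_eq]
  set names := shifts.map (fun s => s.1) with hnames
  set d0 := (PySem.Set.ofList names).foldl (fun d name => d.insert name []) PySem.Dict.empty with hd0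
  have hAkeys : (shifts.foldl (fun d s => d.insert s.1 (pvStepB (d.getD s.1 []) s.2)) d0).keys
      = PySem.Set.ofList names := by
    rw [PySem.Dict.keys_foldl_insert_key shifts (fun s => s.1)
        (fun d s => pvStepB (d.getD s.1 []) s.2) d0, pvSeed_keys, ← hnames,
      pvUpdate_ofList_self]
  have hAnodup : (shifts.foldl (fun d s => d.insert s.1 (pvStepB (d.getD s.1 []) s.2)) d0).keys.Nodup := by
    rw [hAkeys]; exact PySem.Set.nodup_ofList names
  have hA : (shifts.foldl (fun d s => d.insert s.1 (pvStepB (d.getD s.1 []) s.2)) d0).items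
      = (PySem.Set.ofList names).map
          (fun n => (n, ((shifts.filter (fun s => s.1 == n)).map (fun s => s.2)).foldl pvStepB [])) := by
    rw [PySem.Dict.items_eq_map_keys _ hAnodup [], hAkeys]
    refine List.map_congr_left (fun n _ => ?_)
    rw [pvFoldA_getD, pvSeed_getD]
  rw [hA]
  refine List.map_congr_left (fun n _ => ?_)
  rw [pvRuns_eq]
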